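-- pv_equiv track=rewrite | github.com/plavakd10/LeetCode-Daily | LEETCODE_1501_to_2000/1765.Map of Highest Peak.py | highestPeak
-- ===== SOURCE A (Python) =====
-- from collections import deque
--
-- def highestPeak(isWater):
--     rows = len(isWater)
--     cols = len(isWater[0])
--     q = deque()
--     visited = set()
--     res = [[-1]*cols for _ in range(rows)]
--
--     for r in range(rows):
--         for c in range(cols):
--             if isWater[r][c]:
--                 q.append((r,c))
--                 visited.add((r,c))
--                 res[r][c]=0
--     while q:
--         r,c = q.popleft()
--         h = res[r][c]
--
--         neighbors = [[r+1,c],[r,c+1],[r-1,c],[r,c-1]]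
--
--         for nr,nc in neighbors:
--             if (nr<0 or nc<0 or
--             nr==rows or nc==cols or
--             (nr,nc) in visited):
--                 continue
--             q.append((nr,nc))
--             visited.add((nr,nc))
--             res[nr][nc] = h+1
--     return res
-- ===== SOURCE B (Python) =====
-- def highestPeak(isWater):
--     rows, cols = len(isWater), len(isWater[0])
--     water = [(r, c) for r in range(rows) for c in range(cols) if isWater[r][c]]
--     return [[min(abs(r - wr) + abs(c - wc) for wr, wc in water)
--              for c in range(cols)] for r in range(rows)]
-- ===== Notes on version B (the rewrite author's own statement) =====
-- stated objective: simpler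
-- what changed: Replaced the multi-source BFS (deque, visited set, incremental res updates) by a direct closed-form computation: collect the water cells once, then each cell's height is min over water cells of the Manhattan distance |r-wr|+|c-wc|, which equals the BFS distance because the grid graph is a full rectangle.
-- outside the precondition, e.g. on highestPeak([[0, 0]]): A returns [[-1, -1]], B raises ValueError
import Mathlib
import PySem

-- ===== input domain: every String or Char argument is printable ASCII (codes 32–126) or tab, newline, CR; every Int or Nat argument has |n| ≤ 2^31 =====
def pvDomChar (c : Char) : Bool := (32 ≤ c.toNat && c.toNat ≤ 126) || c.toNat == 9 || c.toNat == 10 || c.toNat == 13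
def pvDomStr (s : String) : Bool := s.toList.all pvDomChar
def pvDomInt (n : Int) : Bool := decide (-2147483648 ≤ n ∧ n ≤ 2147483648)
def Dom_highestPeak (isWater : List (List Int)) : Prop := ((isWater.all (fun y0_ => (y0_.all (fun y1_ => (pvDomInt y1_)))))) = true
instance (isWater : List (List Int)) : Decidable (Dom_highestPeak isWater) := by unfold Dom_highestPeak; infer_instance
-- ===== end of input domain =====

-- B replaces A's multi-source BFS (deque + visited set) by a closed-form computation:
-- each cell's value is the minimum Manhattan distance to a water cell (equal to the BFS
-- distance because the grid graph is a full rectangle); objective: simpler.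

-- ===== PORT A =====
-- res[r][c] read / write (indices are always ≥ 0 where A touches res)
def pvMGet (m : List (List Int)) (r c : Int) : Int := (m.getD r.toNat []).getD c.toNat 0

def pvMSet (m : List (List Int)) (r c : Int) (v : Int) : List (List Int) :=
  m.set r.toNat ((m.getD r.toNat []).set c.toNat v)

-- inner `for nr,nc in neighbors` loop of A
def pvNbrsA (rows cols h : Int) :
    List (Int × Int) → List (Int × Int) → PySem.Set (Int × Int) → List (List Int) →
    List (Int × Int) × PySem.Set (Int × Int) × List (List Int)
  | [], q, V, res => (q, V, res)
  | (nr, nc) :: t, q, V, res =>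
    if nr < 0 ∨ nc < 0 ∨ nr = rows ∨ nc = cols ∨ (nr, nc) ∈ V then
      pvNbrsA rows cols h t q V res
    else
      pvNbrsA rows cols h t (q ++ [(nr, nc)]) (PySem.Set.add V (nr, nc))
        (pvMSet res nr nc (h + 1))

-- `while q:` loop of A; fuel bounds the number of dequeues (rows*cols+1 always
-- suffices: the proof shows q.length + number of -1 cells never exceeds the fuel)
def pvLoopA (rows cols : Int) :
    Nat → List (Int × Int) → PySem.Set (Int × Int) → List (List Int) → List (List Int)
  | _, [], _, res => res
  | 0, _ :: _, _, res => res
  | fuel + 1, (r, c) :: qt, V, res =>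
    let h := pvMGet res r c
    let s := pvNbrsA rows cols h [(r + 1, c), (r, c + 1), (r - 1, c), (r, c - 1)] qt V res
    pvLoopA rows cols fuel s.1 s.2.1 s.2.2

-- the `for r in range(rows): for c in range(cols):` seeding loops of A
def pvInitA (isWater : List (List Int)) :
    List (Int × Int) × PySem.Set (Int × Int) × List (List Int) :=
  (List.range isWater.length).foldl (fun st r =>
    (List.range (isWater.headI).length).foldl
      (fun (st : List (Int × Int) × PySem.Set (Int × Int) × List (List Int)) c =>
        if (isWater.getD r []).getD c 0 ≠ 0 then
          (st.1 ++ [((r : Int), (c : Int))], PySem.Set.add st.2.1 ((r : Int), (c : Int)),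
           pvMSet st.2.2 (r : Int) (c : Int) 0)
        else st) st)
    ([], PySem.Set.empty,
     List.replicate isWater.length (List.replicate (isWater.headI).length (-1 : Int)))

def highestPeak (isWater : List (List Int)) : List (List Int) :=
  let rows := isWater.length
  let cols := (isWater.headI).length
  let init := pvInitA isWater
  pvLoopA (rows : Int) (cols : Int) (rows * cols + 1) init.1 init.2.1 init.2.2

-- ===== PORT B =====
def highestPeak_alt (isWater : List (List Int)) : List (List Int) :=
  let rows := isWater.length
  let cols := (isWater.headI).length
  let water := (List.range rows).flatMap (fun r =>
    ((List.range cols).filter (fun c => (isWater.getD r []).getD c 0 ≠ 0)).map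
      (fun (c : Nat) => ((r : Int), (c : Int))))
  (List.range rows).map (fun (r : Nat) => (List.range cols).map (fun (c : Nat) =>
    (PySem.List.min? (water.map (fun w => |(r : Int) - w.1| + |(c : Int) - w.2|))
      (fun x => x)).getD 0))

-- ===== PRECONDITION & SPEC =====
-- Pre_ excludes exactly: the empty grid and grids with a row shorter than row 0 (A raises
-- IndexError there), and grids with at least one column but no water cell in the
-- rows×cols rectangle, where A's all-(-1) matrix is the untouched init sentinel and the
-- natural B raises ValueError (min of an empty sequence).
def Pre_highestPeak (isWater : List (List Int)) : Prop :=
  isWater ≠ [] ∧ (∀ row ∈ isWater, (isWater.headI).length ≤ row.length) ∧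
  ((isWater.any (fun row => (row.take (isWater.headI).length).any (fun v => v ≠ 0))) = true ∨
    (isWater.headI).length = 0)
instance (isWater : List (List Int)) : Decidable (Pre_highestPeak isWater) := by
  unfold Pre_highestPeak; infer_instance

def pvWitness_highestPeak : List (List Int) := [[1, 0], [0, 0]]

def Spec_highestPeak (isWater : List (List Int)) (out : List (List Int)) : Prop := out = highestPeak_alt isWater
instance (isWater : List (List Int)) (out : List (List Int)) : Decidable (Spec_highestPeak isWater out) := by unfold Spec_highestPeak; infer_instance

-- ===== CLAIM (what is proved, stated in full; the proofs are below) =====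
def Claim_equal_highestPeak : Prop := ∀ (isWater : List (List Int)), Dom_highestPeak isWater → Pre_highestPeak isWater → Spec_highestPeak isWater (highestPeak isWater)

-- ===== LEMMAS AND PROOFS =====

-- |a - b| as an if-expression, so that omega can finish distance arithmetic
theorem pv_abs (a b : Int) : |a - b| = if a ≤ b then b - a else a - b := by
  split_ifs with h
  · rw [abs_of_nonpos (by omega)]; omega
  · rw [abs_of_nonneg (by omega)]

-- in-bounds cells of the rows×cols rectangle
def pvInB (g : List (List Int)) (p : Int × Int) : Prop :=
  0 ≤ p.1 ∧ p.1 < (g.length : Int) ∧ 0 ≤ p.2 ∧ p.2 < (((g.headI).length : Nat) : Int)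

theorem pv_inB_mk (g : List (List Int)) (r c : Nat) (hr : r < g.length)
    (hc : c < (g.headI).length) : pvInB g ((r : Int), (c : Int)) := by
  unfold pvInB
  refine ⟨?_, ?_, ?_, ?_⟩ <;> simp <;> omega

-- the water-cell list, exactly as port B builds it
def pvWat (g : List (List Int)) : List (Int × Int) :=
  (List.range g.length).flatMap (fun r =>
    ((List.range (g.headI).length).filter (fun c => (g.getD r []).getD c 0 ≠ 0)).map
      (fun (c : Nat) => ((r : Int), (c : Int))))

-- Manhattan distance
def pvDist (p w : Int × Int) : Int := |p.1 - w.1| + |p.2 - w.2|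

-- the value port B assigns to cell p
def pvD (g : List (List Int)) (p : Int × Int) : Int :=
  (PySem.List.min? ((pvWat g).map (fun w => pvDist p w)) (fun x => x)).getD 0

theorem pv_alt_eq (g : List (List Int)) :
    highestPeak_alt g =
      (List.range g.length).map (fun (r : Nat) => (List.range (g.headI).length).map
        (fun (c : Nat) => pvD g ((r : Int), (c : Int)))) := rfl

theorem pv_mem_wat (g : List (List Int)) (q : Int × Int) :
    q ∈ pvWat g ↔ pvInB g q ∧ (g.getD q.1.toNat []).getD q.2.toNat 0 ≠ 0 := by
  constructor
  · intro hq
    obtain ⟨r, hr, hq2⟩ := List.mem_flatMap.mp hq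
    obtain ⟨c, hc2, heq⟩ := List.mem_map.mp hq2
    obtain ⟨hcr, hcell⟩ := List.mem_filter.mp hc2
    have hrR := List.mem_range.mp hr
    have hcC := List.mem_range.mp hcr
    subst heq
    refine ⟨pv_inB_mk g r c hrR hcC, ?_⟩
    simpa using hcell
  · rintro ⟨⟨h1, h2, h3, h4⟩, hcell⟩
    refine List.mem_flatMap.mpr ⟨q.1.toNat, List.mem_range.mpr (by omega),
      List.mem_map.mpr ⟨q.2.toNat, List.mem_filter.mpr
        ⟨List.mem_range.mpr (by omega), by simpa using hcell⟩, ?_⟩⟩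
    obtain ⟨a, b⟩ := q
    simp only [Prod.mk.injEq]
    simp only at h1 h3
    exact ⟨Int.toNat_of_nonneg h1, Int.toNat_of_nonneg h3⟩

theorem pvDist_nonneg (p w : Int × Int) : 0 ≤ pvDist p w := by
  unfold pvDist; positivity

theorem pvDist_comm (p w : Int × Int) : pvDist p w = pvDist w p := by
  unfold pvDist; rw [abs_sub_comm, abs_sub_comm p.2]

theorem pvDist_triangle (p q w : Int × Int) : pvDist p w ≤ pvDist p q + pvDist q w := by
  unfold pvDist
  have h1 := abs_sub_le p.1 q.1 w.1
  have h2 := abs_sub_le p.2 q.2 w.2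
  omega

theorem pvD_exists (g : List (List Int)) (hW : pvWat g ≠ []) (p : Int × Int) :
    ∃ w ∈ pvWat g, pvD g p = pvDist p w := by
  unfold pvD
  cases hmin : PySem.List.min? ((pvWat g).map (fun w => pvDist p w)) (fun x => x) with
  | none =>
    have := (PySem.List.min?_eq_none_iff _ _).mp hmin
    simp only [List.map_eq_nil_iff] at this
    exact absurd this hW
  | some m =>
    have hm := PySem.List.min?_mem hmin
    obtain ⟨w, hw, hval⟩ := List.mem_map.mp hm
    exact ⟨w, hw, by simp [hval]⟩

theorem pvD_le (g : List (List Int)) (p w : Int × Int) (hw : w ∈ pvWat g) :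
    pvD g p ≤ pvDist p w := by
  unfold pvD
  cases hmin : PySem.List.min? ((pvWat g).map (fun w => pvDist p w)) (fun x => x) with
  | none =>
    have := (PySem.List.min?_eq_none_iff _ _).mp hmin
    simp only [List.map_eq_nil_iff] at this
    exact absurd (this ▸ hw) (List.not_mem_nil)
  | some m =>
    have := PySem.List.min?_isMin hmin (pvDist p w) (List.mem_map_of_mem hw)
    simpa using this

theorem pvD_nonneg (g : List (List Int)) (hW : pvWat g ≠ []) (p : Int × Int) :
    0 ≤ pvD g p := by
  obtain ⟨w, _, he⟩ := pvD_exists g hW p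
  rw [he]; exact pvDist_nonneg p w

theorem pvD_water (g : List (List Int)) (hW : pvWat g ≠ []) (p : Int × Int)
    (hp : p ∈ pvWat g) : pvD g p = 0 := by
  have h1 := pvD_le g p p hp
  have h2 := pvD_nonneg g hW p
  have : pvDist p p = 0 := by unfold pvDist; simp
  omega

theorem pvD_zero_mem (g : List (List Int)) (hW : pvWat g ≠ []) (p : Int × Int)
    (h : pvD g p = 0) : p ∈ pvWat g := by
  obtain ⟨w, hwm, he⟩ := pvD_exists g hW p
  have : p = w := by
    have h1 : |p.1 - w.1| + |p.2 - w.2| = 0 := by unfold pvDist at he; omega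
    have := abs_nonneg (p.1 - w.1); have := abs_nonneg (p.2 - w.2)
    have e1 : p.1 - w.1 = 0 := by
      have := abs_eq_zero.mp (show |p.1 - w.1| = 0 by omega); omega
    have e2 : p.2 - w.2 = 0 := by
      have := abs_eq_zero.mp (show |p.2 - w.2| = 0 by omega); omega
    exact Prod.ext (by omega) (by omega)
  exact this ▸ hwm

theorem pvD_lip (g : List (List Int)) (hW : pvWat g ≠ []) (p q : Int × Int)
    (hd : pvDist p q = 1) : pvD g q ≤ pvD g p + 1 := by
  obtain ⟨w, hwm, he⟩ := pvD_exists g hW p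
  have h1 := pvD_le g q w hwm
  have h2 := pvDist_triangle q p w
  rw [pvDist_comm q p, hd] at h2
  omega

-- the four dist-1 cells
theorem pv_adj_mem (f n : Int × Int) (h : pvDist f n = 1) :
    n = (f.1 + 1, f.2) ∨ n = (f.1, f.2 + 1) ∨ n = (f.1 - 1, f.2) ∨ n = (f.1, f.2 - 1) := by
  obtain ⟨a, b⟩ := n
  unfold pvDist at h
  rw [pv_abs, pv_abs] at h
  simp only [Prod.mk.injEq]
  split_ifs at h <;> omega

-- going one step toward a nearest water cell lowers pvD by exactly one
theorem pv_step (g : List (List Int)) (hW : pvWat g ≠ []) (p n w : Int × Int)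
    (hwm : w ∈ pvWat g) (he : pvD g p = pvDist p w) (hd1 : pvDist p n = 1)
    (hd2 : pvDist n w + 1 = pvDist p w) : pvD g n = pvD g p - 1 := by
  have hub := pvD_le g n w hwm
  have hlb := pvD_lip g hW n p (by rw [pvDist_comm]; exact hd1)
  omega

theorem pvD_descent (g : List (List Int)) (hW : pvWat g ≠ []) (p : Int × Int)
    (hin : pvInB g p) (hpos : 0 < pvD g p) :
    ∃ n, pvInB g n ∧ pvDist p n = 1 ∧ pvD g n = pvD g p - 1 := by
  obtain ⟨w, hwm, he⟩ := pvD_exists g hW p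
  have hwin := ((pv_mem_wat g w).mp hwm).1
  obtain ⟨a1, a2, a3, a4⟩ := hin
  obtain ⟨b1, b2, b3, b4⟩ := hwin
  have hdpos : 0 < pvDist p w := by omega
  rcases lt_trichotomy p.1 w.1 with h1 | h1 | h1
  · refine ⟨(p.1 + 1, p.2), ⟨?_, ?_, ?_, ?_⟩, ?_, pv_step g hW p _ w hwm he ?_ ?_⟩
    · simp only; omega
    · simp only; omega
    · simp only; omega
    · simp only; omega
    · unfold pvDist; simp only [pv_abs]; split_ifs <;> omega
    · unfold pvDist; simp only [pv_abs]; split_ifs <;> omega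
    · unfold pvDist; simp only [pv_abs]; split_ifs <;> omega
  · rcases lt_trichotomy p.2 w.2 with h2 | h2 | h2
    · refine ⟨(p.1, p.2 + 1), ⟨?_, ?_, ?_, ?_⟩, ?_, pv_step g hW p _ w hwm he ?_ ?_⟩
      · simp only; omega
      · simp only; omega
      · simp only; omega
      · simp only; omega
      · unfold pvDist; simp only [pv_abs]; split_ifs <;> omega
      · unfold pvDist; simp only [pv_abs]; split_ifs <;> omega
      · unfold pvDist; simp only [pv_abs]; split_ifs <;> omega
    · exfalso; unfold pvDist at hdpos; simp only [pv_abs] at hdpos; split_ifs at hdpos <;> omega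
    · refine ⟨(p.1, p.2 - 1), ⟨?_, ?_, ?_, ?_⟩, ?_, pv_step g hW p _ w hwm he ?_ ?_⟩
      · simp only; omega
      · simp only; omega
      · simp only; omega
      · simp only; omega
      · unfold pvDist; simp only [pv_abs]; split_ifs <;> omega
      · unfold pvDist; simp only [pv_abs]; split_ifs <;> omega
      · unfold pvDist; simp only [pv_abs]; split_ifs <;> omega
  · refine ⟨(p.1 - 1, p.2), ⟨?_, ?_, ?_, ?_⟩, ?_, pv_step g hW p _ w hwm he ?_ ?_⟩
    · simp only; omega
    · simp only; omega
    · simp only; omega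
    · simp only; omega
    · unfold pvDist; simp only [pv_abs]; split_ifs <;> omega
    · unfold pvDist; simp only [pv_abs]; split_ifs <;> omega
    · unfold pvDist; simp only [pv_abs]; split_ifs <;> omega

-- ----- matrix helpers -----

theorem pv_getD_set_self {α : Type} (l : List α) (n : Nat) (a d : α) (h : n < l.length) :
    (l.set n a).getD n d = a := by
  rw [List.getD_eq_getElem?_getD, List.getElem?_set_self h, Option.getD_some]

theorem pv_getD_set_ne {α : Type} (l : List α) (n m : Nat) (a d : α) (h : n ≠ m) :
    (l.set n a).getD m d = l.getD m d := by
  rw [List.getD_eq_getElem?_getD, List.getElem?_set_ne h, ← List.getD_eq_getElem?_getD]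

theorem pvMGet_mset_self (g : List (List Int)) (res : List (List Int)) (r c v : Int)
    (hlen : res.length = g.length) (hrow : ∀ row ∈ res, row.length = (g.headI).length)
    (hin : pvInB g (r, c)) : pvMGet (pvMSet res r c v) r c = v := by
  obtain ⟨h1, h2, h3, h4⟩ := hin
  simp only at h1 h2 h3 h4
  have hr : r.toNat < res.length := by omega
  have hrowlen : (res.getD r.toNat []).length = (g.headI).length := by
    rw [List.getD_eq_getElem _ _ hr]; exact hrow _ (List.getElem_mem hr)
  have hc : c.toNat < (res.getD r.toNat []).length := by omega
  unfold pvMGet pvMSet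
  rw [pv_getD_set_self _ _ _ _ hr, pv_getD_set_self _ _ _ _ hc]

theorem pvMGet_mset_ne (res : List (List Int)) (r c v : Int) (p : Int × Int)
    (h0r : 0 ≤ p.1) (h0c : 0 ≤ p.2) (h0r2 : 0 ≤ r) (h0c2 : 0 ≤ c)
    (hne : p ≠ (r, c)) : pvMGet (pvMSet res r c v) p.1 p.2 = pvMGet res p.1 p.2 := by
  unfold pvMGet pvMSet
  by_cases hr : p.1.toNat = r.toNat
  · have hcne : p.2.toNat ≠ c.toNat := by
      intro hc
      apply hne
      obtain ⟨a, b⟩ := p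
      simp only at h0r h0c hr hc ⊢
      simp only [Prod.mk.injEq]
      omega
    by_cases hrin : r.toNat < res.length
    · rw [hr, pv_getD_set_self _ _ _ _ hrin, pv_getD_set_ne _ _ _ _ _ (Ne.symm hcne)]
    · rw [List.set_eq_of_length_le (by omega)]
  · rw [pv_getD_set_ne _ _ _ _ _ (Ne.symm hr)]

theorem pvMSet_len (res : List (List Int)) (r c v : Int) :
    (pvMSet res r c v).length = res.length := by
  unfold pvMSet; simp

theorem pvMSet_rows (g res : List (List Int)) (r c v : Int)
    (hlen : res.length = g.length) (hrow : ∀ row ∈ res, row.length = (g.headI).length)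
    (hin : pvInB g (r, c)) :
    ∀ row ∈ pvMSet res r c v, row.length = (g.headI).length := by
  obtain ⟨h1, h2, h3, h4⟩ := hin
  simp only at h1 h2 h3 h4
  have hr : r.toNat < res.length := by omega
  intro row hrm
  rcases List.mem_or_eq_of_mem_set hrm with h | h
  · exact hrow _ h
  · subst h
    rw [List.length_set, List.getD_eq_getElem _ _ hr]
    exact hrow _ (List.getElem_mem hr)

-- number of still -1 cells
def pvCnt (res : List (List Int)) : Nat := (res.map (fun row => row.count (-1))).sum

theorem pv_count_set (row : List Int) (j : Nat) (v : Int) (hj : j < row.length)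
    (hold : row[j] = -1) (hv : v ≠ -1) :
    (row.set j v).count (-1) + 1 = row.count (-1) := by
  induction row generalizing j with
  | nil => simp at hj
  | cons a t IH =>
    cases j with
    | zero =>
      simp only [List.getElem_cons_zero] at hold
      subst hold
      simp [hv]
    | succ j =>
      simp only [List.getElem_cons_succ] at hold
      have := IH j (by simpa using hj) hold
      simp only [List.set_cons_succ, List.count_cons]
      omega

theorem pv_sum_set (l : List (List Int)) (i : Nat) (row' : List Int) (hi : i < l.length) :
    ((l.set i row').map (fun row => row.count (-1))).sum + l[i].count (-1) =
      (l.map (fun row => row.count (-1))).sum + row'.count (-1) := by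
  induction l generalizing i with
  | nil => simp at hi
  | cons a t IH =>
    cases i with
    | zero => simp [List.set_cons_zero]; omega
    | succ i =>
      have := IH i (by simpa using hi)
      simp only [List.set_cons_succ, List.map_cons, List.sum_cons, List.getElem_cons_succ]
      omega

theorem pvCnt_mset (g res : List (List Int)) (r c v : Int)
    (hlen : res.length = g.length) (hrow : ∀ row ∈ res, row.length = (g.headI).length)
    (hin : pvInB g (r, c)) (hold : pvMGet res r c = -1) (hv : v ≠ -1) :
    pvCnt (pvMSet res r c v) + 1 = pvCnt res := by
  obtain ⟨h1, h2, h3, h4⟩ := hin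
  simp only at h1 h2 h3 h4
  have hr : r.toNat < res.length := by omega
  have hrowlen : (res.getD r.toNat []).length = (g.headI).length := by
    rw [List.getD_eq_getElem _ _ hr]; exact hrow _ (List.getElem_mem hr)
  have hc : c.toNat < (res.getD r.toNat []).length := by omega
  unfold pvCnt pvMSet
  have hsum := pv_sum_set res r.toNat ((res.getD r.toNat []).set c.toNat v) hr
  have hget : res[r.toNat] = res.getD r.toNat [] := (List.getD_eq_getElem _ _ hr).symm
  rw [hget] at hsum
  have hcnt := pv_count_set (res.getD r.toNat []) c.toNat v hc
    (by unfold pvMGet at hold; rwa [List.getD_eq_getElem _ _ hc] at hold) hv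
  omega

-- ----- the target matrix -----

def pvTgt (g : List (List Int)) : List (List Int) :=
  (List.range g.length).map (fun (r : Nat) => (List.range (g.headI).length).map
    (fun (c : Nat) => pvD g ((r : Int), (c : Int))))

theorem pv_map_range_get? {α : Type} (f : Nat → α) (n i : Nat) (hi : i < n) :
    ((List.range n).map f)[i]? = some (f i) := by
  rw [List.getElem?_map, List.getElem?_range hi]
  rfl

theorem pv_res_eq_tgt (g res : List (List Int)) (hlen : res.length = g.length)
    (hrow : ∀ row ∈ res, row.length = (g.headI).length)
    (hval : ∀ p, pvInB g p → pvMGet res p.1 p.2 = pvD g p) : res = pvTgt g := by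
  have htlen : (pvTgt g).length = g.length := by simp [pvTgt]
  apply List.ext_getElem?
  intro r
  by_cases hr : r < g.length
  · have hr1 : r < res.length := by omega
    rw [List.getElem?_eq_getElem hr1]
    unfold pvTgt
    rw [pv_map_range_get? _ _ _ hr]
    have hrowlen : res[r].length = (g.headI).length := hrow _ (List.getElem_mem hr1)
    congr 1
    apply List.ext_getElem?
    intro c
    by_cases hc : c < (g.headI).length
    · have hc1 : c < res[r].length := by omega
      rw [List.getElem?_eq_getElem hc1, pv_map_range_get? _ _ _ hc]
      have hv := hval ((r : Int), (c : Int)) (pv_inB_mk g r c hr hc)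
      unfold pvMGet at hv
      simp only [Int.toNat_natCast] at hv
      rw [List.getD_eq_getElem _ _ hr1] at hv
      rw [List.getD_eq_getElem _ _ hc1] at hv
      rw [hv]
    · rw [List.getElem?_eq_none (by omega), List.getElem?_eq_none (by simp; omega)]
  · rw [List.getElem?_eq_none (by omega), List.getElem?_eq_none (by omega)]

-- ----- BFS invariant -----

structure pvMid (g : List (List Int)) (V : List (Int × Int)) (res : List (List Int)) : Prop where
  resLen : res.length = g.length
  rowLen : ∀ row ∈ res, row.length = (g.headI).length
  visIn : ∀ p ∈ V, pvInB g p
  visVal : ∀ p ∈ V, pvMGet res p.1 p.2 = pvD g p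
  unvisVal : ∀ p, pvInB g p → p ∉ V → pvMGet res p.1 p.2 = -1

structure pvInv (g : List (List Int)) (q V : List (Int × Int)) (res : List (List Int)) : Prop where
  mid : pvMid g V res
  qSub : ∀ p ∈ q, p ∈ V
  qNodup : q.Nodup
  qMono : q.Pairwise (fun a b => pvD g a ≤ pvD g b)
  qSpan : ∀ a ∈ q, ∀ b ∈ q, pvD g b ≤ pvD g a + 1
  closed : ∀ p ∈ V, p ∉ q → ∀ n, pvInB g n → pvDist p n = 1 → n ∈ V
  water : ∀ p ∈ pvWat g, p ∈ V

-- completeness: at a dequeue of f, every unvisited in-bounds cell has pvD ≥ pvD f + 1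
theorem pv_complete (g : List (List Int)) (hW : pvWat g ≠ []) (f : Int × Int)
    (qt V : List (Int × Int)) (res : List (List Int)) (inv : pvInv g (f :: qt) V res) :
    ∀ p, pvInB g p → p ∉ V → pvD g f + 1 ≤ pvD g p := by
  have hmono := (List.pairwise_cons.mp inv.qMono).1
  suffices H : ∀ k p, pvInB g p → p ∉ V → (pvD g p).toNat = k → pvD g f + 1 ≤ pvD g p by
    intro p hin hnv; exact H _ p hin hnv rfl
  intro k
  induction k using Nat.strong_induction_on with
  | _ k IH =>
    intro p hin hnv hk
    have hnn := pvD_nonneg g hW p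
    have hpos : 0 < pvD g p := by
      rcases eq_or_lt_of_le hnn with h0 | h0
      · exact absurd (inv.water p (pvD_zero_mem g hW p h0.symm)) hnv
      · exact h0
    obtain ⟨n, hnin, hnd, hnD⟩ := pvD_descent g hW p hin hpos
    by_cases hv : n ∈ V
    · by_cases hq : n ∈ f :: qt
      · have hfn : pvD g f ≤ pvD g n := by
          rcases List.mem_cons.mp hq with rfl | hq2
          · exact le_refl _
          · exact hmono n hq2
        omega
      · exact absurd (inv.closed n hv hq p hin (by rw [pvDist_comm]; exact hnd)) hnv
    · have := IH (pvD g n).toNat (by omega) n hnin hv rfl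
      omega

-- when the queue is empty every in-bounds cell has been visited, so res is the target
theorem pv_done (g : List (List Int)) (hW : pvWat g ≠ []) (V : List (Int × Int))
    (res : List (List Int)) (inv : pvInv g [] V res) : res = pvTgt g := by
  have hall : ∀ k p, pvInB g p → (pvD g p).toNat = k → p ∈ V := by
    intro k
    induction k using Nat.strong_induction_on with
    | _ k IH =>
      intro p hin hk
      have hnn := pvD_nonneg g hW p
      rcases eq_or_lt_of_le hnn with h0 | h0
      · exact inv.water p (pvD_zero_mem g hW p h0.symm)
      · obtain ⟨n, hnin, hnd, hnD⟩ := pvD_descent g hW p hin h0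
        have hnV : n ∈ V := IH (pvD g n).toNat (by omega) n hnin rfl
        exact inv.closed n hnV (List.not_mem_nil) p hin (by rw [pvDist_comm]; exact hnd)
  exact pv_res_eq_tgt g res inv.mid.resLen inv.mid.rowLen
    (fun p hp => inv.mid.visVal p (hall (pvD g p).toNat p hp rfl))

-- the neighbor fold
theorem pv_nbrs (g : List (List Int)) (hW : pvWat g ≠ []) (h : Int) (f : Int × Int)
    (hf : pvInB g f) (hfD : pvD g f = h) :
    ∀ (ns : List (Int × Int)), (∀ n ∈ ns, pvDist f n = 1) →
    ∀ (q0 V : List (Int × Int)) (res : List (List Int)), pvMid g V res →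
    (∀ p, pvInB g p → p ∉ V → h + 1 ≤ pvD g p) →
    ∃ NEW res',
      pvNbrsA (g.length : Int) ((g.headI).length : Int) h ns q0 V res =
        (q0 ++ NEW, V ++ NEW, res') ∧
      pvMid g (V ++ NEW) res' ∧
      NEW.Nodup ∧
      (∀ p ∈ NEW, pvInB g p ∧ p ∉ V ∧ pvD g p = h + 1) ∧
      (∀ n ∈ ns, pvInB g n → n ∈ V ++ NEW) ∧
      pvCnt res' + NEW.length = pvCnt res := by
  intro ns
  induction ns with
  | nil =>
    intro _ q0 V res hmid hcomp
    exact ⟨[], res, by simp [pvNbrsA], by simpa using hmid, List.nodup_nil,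
      by simp, by simp, by simp⟩
  | cons n t IHt =>
    intro hns q0 V res hmid hcomp
    obtain ⟨n1, n2⟩ := n
    have hnd1 : pvDist f (n1, n2) = 1 := hns _ (List.mem_cons_self ..)
    have hrest : ∀ m ∈ t, pvDist f m = 1 := fun m hm => hns m (List.mem_cons_of_mem _ hm)
    by_cases hgv : (n1, n2) ∈ V
    · have hstep : pvNbrsA (g.length : Int) ((g.headI).length : Int) h ((n1, n2) :: t) q0 V res
          = pvNbrsA (g.length : Int) ((g.headI).length : Int) h t q0 V res := by
        simp only [pvNbrsA]
        rw [if_pos (Or.inr (Or.inr (Or.inr (Or.inr hgv))))]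
      obtain ⟨NEW, res', heq, hmid', hnd', hprops, hcover, hcnt⟩ := IHt hrest q0 V res hmid hcomp
      refine ⟨NEW, res', by rw [hstep]; exact heq, hmid', hnd', hprops, ?_, hcnt⟩
      intro m hm hinm
      rcases List.mem_cons.mp hm with rfl | hm2
      · exact List.mem_append_left _ hgv
      · exact hcover m hm2 hinm
    · by_cases hin : pvInB g (n1, n2)
      · have hgf : ¬(n1 < 0 ∨ n2 < 0 ∨ n1 = (g.length : Int) ∨ n2 = ((g.headI).length : Int)
            ∨ (n1, n2) ∈ V) := by
          have hin2 := hin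
          obtain ⟨i1, i2, i3, i4⟩ := hin2
          simp only at i1 i2 i3 i4
          rintro (hcon | hcon | hcon | hcon | hcon)
          · omega
          · omega
          · omega
          · omega
          · exact hgv hcon
        have hDn : pvD g (n1, n2) = h + 1 := by
          have hub := pvD_lip g hW f (n1, n2) hnd1
          have hlb := hcomp (n1, n2) hin hgv
          omega
        have hold : pvMGet res n1 n2 = -1 := hmid.unvisVal (n1, n2) hin hgv
        have hh0 : 0 ≤ h := by
          have := pvD_nonneg g hW f; omega
        have hin2 := hin
        obtain ⟨i1, i2, i3, i4⟩ := hin2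
        simp only at i1 i2 i3 i4
        have hmid2 : pvMid g (V ++ [(n1, n2)]) (pvMSet res n1 n2 (h + 1)) := by
          refine ⟨?_, ?_, ?_, ?_, ?_⟩
          · rw [pvMSet_len, hmid.resLen]
          · exact pvMSet_rows g res n1 n2 _ hmid.resLen hmid.rowLen hin
          · intro p hp
            rcases List.mem_append.mp hp with hp | hp
            · exact hmid.visIn p hp
            · rw [List.mem_singleton.mp hp]; exact hin
          · intro p hp
            rcases List.mem_append.mp hp with hp | hp
            · have hpne : p ≠ (n1, n2) := fun hh => hgv (hh ▸ hp)
              have hpin := hmid.visIn p hp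
              rw [pvMGet_mset_ne res n1 n2 _ p hpin.1 hpin.2.2.1 i1 i3 hpne]
              exact hmid.visVal p hp
            · rw [List.mem_singleton.mp hp]
              rw [pvMGet_mset_self g res n1 n2 _ hmid.resLen hmid.rowLen hin]
              exact hDn.symm
          · intro p hpin hpnv
            have hpne : p ≠ (n1, n2) :=
              fun hh => hpnv (hh ▸ List.mem_append_right _ (List.mem_singleton_self _))
            rw [pvMGet_mset_ne res n1 n2 _ p hpin.1 hpin.2.2.1 i1 i3 hpne]
            exact hmid.unvisVal p hpin (fun hh => hpnv (List.mem_append_left _ hh))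
        have hcomp2 : ∀ p, pvInB g p → p ∉ V ++ [(n1, n2)] → h + 1 ≤ pvD g p :=
          fun p hp hnp => hcomp p hp (fun hh => hnp (List.mem_append_left _ hh))
        have hcnt2 : pvCnt (pvMSet res n1 n2 (h + 1)) + 1 = pvCnt res :=
          pvCnt_mset g res n1 n2 (h + 1) hmid.resLen hmid.rowLen hin hold (by omega)
        obtain ⟨NEW', res', heq, hmid', hnd', hprops, hcover, hcnt⟩ :=
          IHt hrest (q0 ++ [(n1, n2)]) (V ++ [(n1, n2)]) (pvMSet res n1 n2 (h + 1)) hmid2 hcomp2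
        refine ⟨(n1, n2) :: NEW', res', ?_, ?_, ?_, ?_, ?_, ?_⟩
        · simp only [pvNbrsA]
          rw [if_neg hgf]
          rw [show PySem.Set.add V (n1, n2) = V ++ [(n1, n2)] from by
            simp [PySem.Set.add, List.contains_eq_mem, hgv]]
          rw [heq]
          simp [List.append_assoc]
        · rwa [List.append_assoc, List.singleton_append] at hmid'
        · refine List.nodup_cons.mpr ⟨?_, hnd'⟩
          intro hmem
          exact (hprops _ hmem).2.1 (List.mem_append_right _ (List.mem_singleton_self _))
        · intro p hp
          rcases List.mem_cons.mp hp with rfl | hp2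
          · exact ⟨hin, hgv, hDn⟩
          · obtain ⟨pa, pb, pc⟩ := hprops p hp2
            exact ⟨pa, fun hh => pb (List.mem_append_left _ hh), pc⟩
        · intro m hm hinm
          rcases List.mem_cons.mp hm with rfl | hm2
          · exact List.mem_append_right _ (List.mem_cons_self ..)
          · have := hcover m hm2 hinm
            rwa [List.append_assoc, List.singleton_append] at this
        · simp only [List.length_cons]
          omega
      · have hbound := pv_adj_mem f (n1, n2) hnd1
        have hfb := hf
        obtain ⟨b1, b2, b3, b4⟩ := hfb
        have harith : n1 < 0 ∨ n2 < 0 ∨ n1 = (g.length : Int) ∨ n2 = ((g.headI).length : Int) := by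
          unfold pvInB at hin
          simp only at hin b1 b2 b3 b4
          rcases hbound with hb | hb | hb | hb <;>
            (rw [Prod.ext_iff] at hb; simp only at hb; omega)
        have hstep : pvNbrsA (g.length : Int) ((g.headI).length : Int) h ((n1, n2) :: t) q0 V res
            = pvNbrsA (g.length : Int) ((g.headI).length : Int) h t q0 V res := by
          simp only [pvNbrsA]
          rw [if_pos (by tauto)]
        obtain ⟨NEW, res', heq, hmid', hnd', hprops, hcover, hcnt⟩ := IHt hrest q0 V res hmid hcomp
        refine ⟨NEW, res', by rw [hstep]; exact heq, hmid', hnd', hprops, ?_, hcnt⟩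
        intro m hm hinm
        rcases List.mem_cons.mp hm with rfl | hm2
        · exact absurd hinm hin
        · exact hcover m hm2 hinm

-- the main loop
theorem pv_loop (g : List (List Int)) (hW : pvWat g ≠ []) :
    ∀ (fuel : Nat) (q V : List (Int × Int)) (res : List (List Int)),
    pvInv g q V res → q.length + pvCnt res ≤ fuel →
    pvLoopA (g.length : Int) ((g.headI).length : Int) fuel q V res = pvTgt g := by
  intro fuel
  induction fuel with
  | zero =>
    intro q V res inv hb
    have hq : q = [] := by
      cases q with
      | nil => rfl
      | cons a t => simp at hb
    subst hq
    simp only [pvLoopA]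
    exact pv_done g hW V res inv
  | succ fuel IH =>
    intro q V res inv hb
    cases q with
    | nil =>
      simp only [pvLoopA]
      exact pv_done g hW V res inv
    | cons fc qt =>
      obtain ⟨r, c⟩ := fc
      have hfV : ((r, c) : Int × Int) ∈ V := inv.qSub _ (List.mem_cons_self ..)
      have hfin : pvInB g (r, c) := inv.mid.visIn _ hfV
      have hH : pvMGet res r c = pvD g (r, c) := inv.mid.visVal _ hfV
      have hcomp := pv_complete g hW (r, c) qt V res inv
      have hns : ∀ n ∈ [((r + 1 : Int), c), (r, c + 1), (r - 1, c), (r, c - 1)],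
          pvDist (r, c) n = 1 := by
        intro n hn
        simp only [List.mem_cons, List.not_mem_nil, or_false] at hn
        rcases hn with rfl | rfl | rfl | rfl <;>
          (unfold pvDist; simp only [pv_abs]; split_ifs <;> omega)
      obtain ⟨NEW, res', heq, hmid', hndN, hprops, hcover, hcnt⟩ :=
        pv_nbrs g hW (pvD g (r, c)) (r, c) hfin rfl _ hns qt V res inv.mid hcomp
      simp only [pvLoopA]
      rw [hH, heq]
      refine IH (qt ++ NEW) (V ++ NEW) res' ⟨hmid', ?_, ?_, ?_, ?_, ?_, ?_⟩ ?_
      · intro p hp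
        rcases List.mem_append.mp hp with hp | hp
        · exact List.mem_append_left _ (inv.qSub p (List.mem_cons_of_mem _ hp))
        · exact List.mem_append_right _ hp
      · exact (inv.qNodup.of_cons).append hndN
          (fun a ha hN => (hprops a hN).2.1 (inv.qSub a (List.mem_cons_of_mem _ ha)))
      · refine List.pairwise_append.mpr ⟨(List.pairwise_cons.mp inv.qMono).2,
          List.pairwise_of_forall_mem_list
            (fun a ha b hb => by rw [(hprops a ha).2.2, (hprops b hb).2.2]), ?_⟩
        intro a ha b hb
        rw [(hprops b hb).2.2]
        have := inv.qSpan (r, c) (List.mem_cons_self ..) a (List.mem_cons_of_mem _ ha)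
        omega
      · intro a ha b hb
        have hDa : pvD g (r, c) ≤ pvD g a := by
          rcases List.mem_append.mp ha with h' | h'
          · exact (List.pairwise_cons.mp inv.qMono).1 a h'
          · rw [(hprops a h').2.2]; omega
        have hDb : pvD g b ≤ pvD g (r, c) + 1 := by
          rcases List.mem_append.mp hb with h' | h'
          · exact inv.qSpan (r, c) (List.mem_cons_self ..) b (List.mem_cons_of_mem _ h')
          · rw [(hprops b h').2.2]
        omega
      · intro p hp hpq n hnin hnd
        rcases List.mem_append.mp hp with hpV | hpN
        · by_cases hpf : p = (r, c)
          · subst hpf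
            rcases pv_adj_mem (r, c) n hnd with rfl | rfl | rfl | rfl <;>
              exact hcover _ (by simp) hnin
          · have hnp : p ∉ (r, c) :: qt := by
              intro hcq
              rcases List.mem_cons.mp hcq with h' | h'
              · exact hpf h'
              · exact hpq (List.mem_append_left _ h')
            exact List.mem_append_left _ (inv.closed p hpV hnp n hnin hnd)
        · exact absurd (List.mem_append_right _ hpN) hpq
      · exact fun p hp => List.mem_append_left _ (inv.water p hp)
      · simp only [List.length_append]
        simp only [List.length_cons] at hb
        omega

-- ----- the init double loop -----

structure pvIMid (g : List (List Int)) (V : List (Int × Int)) (res : List (List Int)) : Prop where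
  resLen : res.length = g.length
  rowLen : ∀ row ∈ res, row.length = (g.headI).length
  visIn : ∀ p ∈ V, pvInB g p
  vis0 : ∀ p ∈ V, pvMGet res p.1 p.2 = 0
  unvis : ∀ p, pvInB g p → p ∉ V → pvMGet res p.1 p.2 = -1

theorem pv_init_inner (g : List (List Int)) (r : Nat) (hr : r < g.length) :
    ∀ (cs : List Nat) (q V : List (Int × Int)) (res : List (List Int)),
    cs.Nodup → (∀ c ∈ cs, c < (g.headI).length) →
    (∀ c ∈ cs, ((r : Int), (c : Int)) ∉ V) → pvIMid g V res →
    ∃ res',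
      cs.foldl (fun (st : List (Int × Int) × PySem.Set (Int × Int) × List (List Int)) c =>
        if (g.getD r []).getD c 0 ≠ 0 then
          (st.1 ++ [((r : Int), (c : Int))], PySem.Set.add st.2.1 ((r : Int), (c : Int)),
           pvMSet st.2.2 (r : Int) (c : Int) 0)
        else st) (q, V, res) =
        (q ++ (cs.filter (fun c => (g.getD r []).getD c 0 ≠ 0)).map (fun (c : Nat) => ((r : Int), (c : Int))),
         V ++ (cs.filter (fun c => (g.getD r []).getD c 0 ≠ 0)).map (fun (c : Nat) => ((r : Int), (c : Int))),
         res') ∧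
      pvIMid g (V ++ (cs.filter (fun c => (g.getD r []).getD c 0 ≠ 0)).map (fun (c : Nat) => ((r : Int), (c : Int)))) res' ∧
      pvCnt res' + ((cs.filter (fun c => (g.getD r []).getD c 0 ≠ 0)).length) = pvCnt res := by
  intro cs
  induction cs with
  | nil =>
    intro q V res _ _ _ hmid
    exact ⟨res, by simp, by simpa using hmid, by simp⟩
  | cons c cs IH =>
    intro q V res hnd hlt hfresh hmid
    have hcC : c < (g.headI).length := hlt c (List.mem_cons_self ..)
    have hinB : pvInB g ((r : Int), (c : Int)) := pv_inB_mk g r c hr hcC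
    simp only [List.foldl_cons]
    by_cases hcell : (g.getD r []).getD c 0 ≠ 0
    · rw [if_pos hcell]
      have hfr : ((r : Int), (c : Int)) ∉ V := hfresh c (List.mem_cons_self ..)
      rw [show PySem.Set.add V ((r : Int), (c : Int)) = V ++ [((r : Int), (c : Int))] from by
        simp [PySem.Set.add, List.contains_eq_mem, hfr]]
      have hmid2 : pvIMid g (V ++ [((r : Int), (c : Int))]) (pvMSet res (r : Int) (c : Int) 0) := by
        refine ⟨?_, ?_, ?_, ?_, ?_⟩
        · rw [pvMSet_len, hmid.resLen]
        · exact pvMSet_rows g res _ _ _ hmid.resLen hmid.rowLen hinB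
        · intro p hp
          rcases List.mem_append.mp hp with hp | hp
          · exact hmid.visIn p hp
          · rw [List.mem_singleton.mp hp]; exact hinB
        · intro p hp
          rcases List.mem_append.mp hp with hp | hp
          · have hpne : p ≠ ((r : Int), (c : Int)) := fun hh => hfr (hh ▸ hp)
            have hpin := hmid.visIn p hp
            rw [pvMGet_mset_ne res _ _ _ p hpin.1 hpin.2.2.1 (by positivity) (by positivity) hpne]
            exact hmid.vis0 p hp
          · rw [List.mem_singleton.mp hp]
            rw [pvMGet_mset_self g res _ _ _ hmid.resLen hmid.rowLen hinB]
        · intro p hpin hpnv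
          have hpne : p ≠ ((r : Int), (c : Int)) :=
            fun hh => hpnv (hh ▸ List.mem_append_right _ (List.mem_singleton_self _))
          rw [pvMGet_mset_ne res _ _ _ p hpin.1 hpin.2.2.1 (by positivity) (by positivity) hpne]
          exact hmid.unvis p hpin (fun hh => hpnv (List.mem_append_left _ hh))
      have hfresh2 : ∀ c' ∈ cs, ((r : Int), (c' : Int)) ∉ V ++ [((r : Int), (c : Int))] := by
        intro c' hc' hmem
        rcases List.mem_append.mp hmem with hmem | hmem
        · exact hfresh c' (List.mem_cons_of_mem _ hc') hmem
        · have := List.mem_singleton.mp hmem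
          rw [Prod.ext_iff] at this
          simp only at this
          have hce : c' = c := by exact_mod_cast this.2
          exact (List.nodup_cons.mp hnd).1 (hce ▸ hc')
      have hcnt2 : pvCnt (pvMSet res (r : Int) (c : Int) 0) + 1 = pvCnt res :=
        pvCnt_mset g res _ _ 0 hmid.resLen hmid.rowLen hinB (hmid.unvis _ hinB hfr) (by omega)
      obtain ⟨res', heq, hmid', hcnt'⟩ :=
        IH (q ++ [((r : Int), (c : Int))]) (V ++ [((r : Int), (c : Int))])
          (pvMSet res (r : Int) (c : Int) 0) (List.nodup_cons.mp hnd).2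
          (fun c' hmm => hlt c' (List.mem_cons_of_mem _ hmm)) hfresh2 hmid2
      refine ⟨res', ?_, ?_, ?_⟩
      · rw [heq, List.filter_cons_of_pos (by simpa using hcell), List.map_cons]
        simp [List.append_assoc]
      · rwa [List.filter_cons_of_pos (by simpa using hcell), List.map_cons, List.append_cons]
      · rw [List.filter_cons_of_pos (by simpa using hcell), List.length_cons]
        omega
    · rw [if_neg hcell]
      obtain ⟨res', heq, hmid', hcnt'⟩ :=
        IH q V res (List.nodup_cons.mp hnd).2 (fun c' hmm => hlt c' (List.mem_cons_of_mem _ hmm))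
          (fun c' hmm => hfresh c' (List.mem_cons_of_mem _ hmm)) hmid
      refine ⟨res', ?_, ?_, ?_⟩ <;>
        rw [List.filter_cons_of_neg (by simpa using hcell)] <;> [exact heq; exact hmid'; exact hcnt']

theorem pv_init_outer (g : List (List Int)) :
    ∀ (rs : List Nat) (q V : List (Int × Int)) (res : List (List Int)),
    rs.Pairwise (· < ·) → (∀ r ∈ rs, r < g.length) →
    (∀ p ∈ V, ∀ r ∈ rs, p.1 < (r : Int)) → pvIMid g V res →
    ∃ res',
      rs.foldl (fun st r =>
        (List.range (g.headI).length).foldl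
          (fun (st : List (Int × Int) × PySem.Set (Int × Int) × List (List Int)) c =>
            if (g.getD r []).getD c 0 ≠ 0 then
              (st.1 ++ [((r : Int), (c : Int))], PySem.Set.add st.2.1 ((r : Int), (c : Int)),
               pvMSet st.2.2 (r : Int) (c : Int) 0)
            else st) st) (q, V, res) =
        (q ++ rs.flatMap (fun r => (((List.range (g.headI).length).filter
            (fun c => (g.getD r []).getD c 0 ≠ 0)).map (fun (c : Nat) => ((r : Int), (c : Int))))),
         V ++ rs.flatMap (fun r => (((List.range (g.headI).length).filter
            (fun c => (g.getD r []).getD c 0 ≠ 0)).map (fun (c : Nat) => ((r : Int), (c : Int))))),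
         res') ∧
      pvIMid g (V ++ rs.flatMap (fun r => (((List.range (g.headI).length).filter
            (fun c => (g.getD r []).getD c 0 ≠ 0)).map (fun (c : Nat) => ((r : Int), (c : Int)))))) res' ∧
      pvCnt res' + (rs.flatMap (fun r => (((List.range (g.headI).length).filter
            (fun c => (g.getD r []).getD c 0 ≠ 0)).map (fun (c : Nat) => ((r : Int), (c : Int)))))).length = pvCnt res := by
  intro rs
  induction rs with
  | nil =>
    intro q V res _ _ _ hmid
    exact ⟨res, by simp, by simpa using hmid, by simp⟩
  | cons r rs IH =>
    intro q V res hpw hlt hbound hmid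
    have hrR : r < g.length := hlt r (List.mem_cons_self ..)
    simp only [List.foldl_cons]
    have hfresh : ∀ c ∈ List.range (g.headI).length, ((r : Int), (c : Int)) ∉ V := by
      intro c _ hmem
      have := hbound _ hmem r (List.mem_cons_self ..)
      simp only at this
      omega
    obtain ⟨res1, heq1, hmid1, hcnt1⟩ :=
      pv_init_inner g r hrR (List.range (g.headI).length) q V res List.nodup_range
        (fun c hc => List.mem_range.mp hc) hfresh hmid
    rw [heq1]
    have hbound2 : ∀ p ∈ V ++ ((List.range (g.headI).length).filter
        (fun c => (g.getD r []).getD c 0 ≠ 0)).map (fun (c : Nat) => ((r : Int), (c : Int))),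
        ∀ r' ∈ rs, p.1 < (r' : Int) := by
      intro p hp r' hr'
      rcases List.mem_append.mp hp with hp | hp
      · exact hbound p hp r' (List.mem_cons_of_mem _ hr')
      · obtain ⟨c, -, rfl⟩ := List.mem_map.mp hp
        have hlt2 : r < r' := (List.pairwise_cons.mp hpw).1 r' hr'
        simp only
        exact_mod_cast hlt2
    obtain ⟨res2, heq2, hmid2, hcnt2⟩ :=
      IH (q ++ ((List.range (g.headI).length).filter
            (fun c => (g.getD r []).getD c 0 ≠ 0)).map (fun (c : Nat) => ((r : Int), (c : Int))))
        (V ++ ((List.range (g.headI).length).filter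
            (fun c => (g.getD r []).getD c 0 ≠ 0)).map (fun (c : Nat) => ((r : Int), (c : Int))))
        res1 (List.pairwise_cons.mp hpw).2 (fun r' hmm => hlt r' (List.mem_cons_of_mem _ hmm))
        hbound2 hmid1
    refine ⟨res2, ?_, ?_, ?_⟩
    · rw [heq2]
      simp [List.flatMap_cons, List.append_assoc]
    · rwa [List.flatMap_cons, ← List.append_assoc]
    · rw [List.flatMap_cons, List.length_append, List.length_map]
      omega

theorem pvWat_row_nodup (g : List (List Int)) (r : Nat) :
    (((List.range (g.headI).length).filter (fun c => (g.getD r []).getD c 0 ≠ 0)).map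
      (fun (c : Nat) => ((r : Int), (c : Int)))).Nodup :=
  List.Nodup.map
    (fun a b hab => by
      simp only [Prod.mk.injEq, Int.natCast_inj] at hab
      exact hab.2)
    (List.Nodup.filter _ List.nodup_range)

theorem pvWat_nodup (g : List (List Int)) : (pvWat g).Nodup := by
  unfold pvWat
  suffices H : ∀ rs : List Nat, rs.Nodup →
      (rs.flatMap (fun r => (((List.range (g.headI).length).filter
        (fun c => (g.getD r []).getD c 0 ≠ 0)).map (fun (c : Nat) => ((r : Int), (c : Int)))))).Nodup from
    H _ List.nodup_range
  intro rs hrs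
  induction rs with
  | nil => simp
  | cons r t IH =>
    simp only [List.flatMap_cons]
    refine List.Nodup.append (pvWat_row_nodup g r) (IH hrs.of_cons) ?_
    intro p hp hp2
    obtain ⟨c, -, rfl⟩ := List.mem_map.mp hp
    simp only [List.mem_flatMap] at hp2
    obtain ⟨r', hr', hp2⟩ := hp2
    obtain ⟨c', -, heq⟩ := List.mem_map.mp hp2
    rw [Prod.ext_iff] at heq
    simp only at heq
    have h0 : r' = r := by exact_mod_cast heq.1
    exact (List.nodup_cons.mp hrs).1 (h0 ▸ hr')

theorem pv_pre_hW (g : List (List Int))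
    (hany : (g.any (fun row => (row.take (g.headI).length).any (fun v => v ≠ 0))) = true) :
    pvWat g ≠ [] := by
  rw [List.any_eq_true] at hany
  obtain ⟨row, hrow, hv⟩ := hany
  rw [List.any_eq_true] at hv
  obtain ⟨v, hvm, hvne⟩ := hv
  obtain ⟨r, hr, hrow'⟩ := List.mem_iff_getElem.mp hrow
  obtain ⟨c, hc, hv'⟩ := List.mem_iff_getElem.mp hvm
  have hcC : c < (g.headI).length := by
    rw [List.length_take] at hc
    omega
  have hcrow : c < row.length := by
    rw [List.length_take] at hc
    omega
  have hcell : row[c]'hcrow ≠ 0 := by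
    have ht : (row.take (g.headI).length)[c]'hc = row[c]'hcrow := List.getElem_take
    rw [ht] at hv'
    rw [hv']
    simpa using hvne
  intro hnil
  have hmemw : ((r : Int), (c : Int)) ∈ pvWat g := by
    rw [pv_mem_wat]
    refine ⟨pv_inB_mk g r c hr hcC, ?_⟩
    simp only [Int.toNat_natCast]
    rw [List.getD_eq_getElem _ _ (show r < g.length by omega), hrow']
    rw [List.getD_eq_getElem _ _ (show c < row.length by omega)]
    exact hcell
  rw [hnil] at hmemw
  exact List.not_mem_nil hmemw

theorem pvCnt_replicate (R C : Nat) :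
    pvCnt (List.replicate R (List.replicate C (-1 : Int))) = R * C := by
  unfold pvCnt
  rw [List.map_replicate]
  simp [List.sum_replicate, smul_eq_mul]

theorem pv_foldl_id {α : Type} (l : List Nat) (x : α) : l.foldl (fun st _ => st) x = x := by
  induction l with
  | nil => rfl
  | cons a t IH => exact IH

theorem pv_main (g : List (List Int)) (hp : Pre_highestPeak g) :
    highestPeak g = highestPeak_alt g := by
  obtain ⟨hne, hrows, hor⟩ := hp
  rcases hor with hany | hc0
  case inr =>
    -- zero columns: A returns its untouched init matrix of empty rows; B builds the same
    have hinit : pvInitA g = ([], PySem.Set.empty,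
        List.replicate g.length (List.replicate (g.headI).length (-1 : Int))) := by
      unfold pvInitA
      rw [hc0]
      simp only [List.range_zero, List.foldl_nil]
      exact pv_foldl_id _ _
    unfold highestPeak
    rw [hinit]
    simp only [pvLoopA]
    rw [pv_alt_eq, hc0]
    simp only [List.range_zero, List.map_nil]
    clear hinit
    induction g.length with
    | zero => simp
    | succ n IH =>
      rw [List.replicate_succ' , List.range_succ, List.map_append, ← IH]
      rfl
  case inl =>
  have hW := pv_pre_hW g hany
  have halt : highestPeak_alt g = pvTgt g := pv_alt_eq g
  rw [halt]
  have himid0 : pvIMid g []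
      (List.replicate g.length (List.replicate (g.headI).length (-1 : Int))) := by
    refine ⟨by simp, by simp, by simp, by simp, ?_⟩
    intro p hpin _
    obtain ⟨h1, h2, h3, h4⟩ := hpin
    unfold pvMGet
    have hrow0 : (List.replicate g.length (List.replicate (g.headI).length (-1 : Int))).getD
        p.1.toNat [] = List.replicate (g.headI).length (-1 : Int) := by
      rw [List.getD_eq_getElem _ _ (by simp; omega), List.getElem_replicate]
    rw [hrow0, List.getD_eq_getElem _ _ (by simp; omega), List.getElem_replicate]
  obtain ⟨res1, heq, hmid1, hcnt1⟩ :=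
    pv_init_outer g (List.range g.length) [] []
      (List.replicate g.length (List.replicate (g.headI).length (-1 : Int)))
      List.pairwise_lt_range (fun r hmm => List.mem_range.mp hmm) (by simp) himid0
  have hinit : pvInitA g = (pvWat g, pvWat g, res1) := by
    unfold pvInitA
    rw [show (([], PySem.Set.empty, List.replicate g.length
        (List.replicate (g.headI).length (-1 : Int))) :
        List (Int × Int) × PySem.Set (Int × Int) × List (List Int)) =
      (([], [], List.replicate g.length (List.replicate (g.headI).length (-1 : Int))) :
        List (Int × Int) × List (Int × Int) × List (List Int)) from rfl]
    rw [heq]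
    rfl
  have hwlen := hcnt1
  rw [List.length_flatMap] at hwlen
  unfold highestPeak
  rw [hinit]
  have hinv : pvInv g (pvWat g) (pvWat g) res1 := by
    have hmid1' : pvIMid g (pvWat g) res1 := by
      have : ([] : List (Int × Int)) ++ (List.range g.length).flatMap
          (fun r => (((List.range (g.headI).length).filter
            (fun c => (g.getD r []).getD c 0 ≠ 0)).map (fun (c : Nat) => ((r : Int), (c : Int))))) =
          pvWat g := by
        rw [List.nil_append]; rfl
      rwa [this] at hmid1
    refine ⟨⟨hmid1'.resLen, hmid1'.rowLen, hmid1'.visIn, ?_, hmid1'.unvis⟩,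
      fun p hp => hp, pvWat_nodup g, ?_, ?_, ?_, fun p hp => hp⟩
    · intro p hp
      rw [hmid1'.vis0 p hp, pvD_water g hW p hp]
    · exact List.pairwise_of_forall_mem_list
        (fun a ha b hb => by rw [pvD_water g hW a ha, pvD_water g hW b hb])
    · intro a ha b hb
      rw [pvD_water g hW a ha, pvD_water g hW b hb]
      omega
    · exact fun p hp hnp => absurd hp hnp
  have hwat : pvWat g = (List.range g.length).flatMap
      (fun r => (((List.range (g.headI).length).filter
        (fun c => (g.getD r []).getD c 0 ≠ 0)).map (fun (c : Nat) => ((r : Int), (c : Int))))) := rfl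
  have hcnt0 := pvCnt_replicate g.length (g.headI).length
  refine pv_loop g hW (g.length * (g.headI).length + 1) (pvWat g) (pvWat g) res1 hinv ?_
  rw [hwat, List.length_flatMap]
  omega

-- ===== VERDICT (by name: the statement is the Claim_ definition above) =====
theorem highestPeak_spec : Claim_equal_highestPeak := by
  intro g _ hp
  unfold Spec_highestPeak
  exact pv_main g hp
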